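-- pv_equiv track=rewrite | github.com/ArunGiri392/FamousCodingInterviewQuestions | permutationsofstring.py | stringpermutations
-- ===== SOURCE A (Python) =====
-- def stringpermutations(first_string, second_string):
--     dictionary = {}
--     for element in first_string:
--         dictionary[element] = 1
--     count = 0
--     for element in second_string:
--         if element in dictionary:
--             count += 1
--             if count == len(first_string):
--                 return True
--         else:
--             count = 0
--     return False
-- ===== SOURCE B (Python) =====
-- def stringpermutations(first_string, second_string):
--     charset = set(first_string)
--     n = len(first_string)
--     mask = ''.join('1' if c in charset else '0' for c in second_string)
--     return n != 0 and '1' * n in mask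
-- ===== Notes on version B (the rewrite author's own statement) =====
-- stated objective: alternative
-- what changed: Replaces A's online counter with early return by a two-phase decomposition: build the 0/1 membership mask of second_string, then test whether '1'*len(first_string) occurs as a substring (the empty first_string still yields False via the n != 0 guard).
import Mathlib
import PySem

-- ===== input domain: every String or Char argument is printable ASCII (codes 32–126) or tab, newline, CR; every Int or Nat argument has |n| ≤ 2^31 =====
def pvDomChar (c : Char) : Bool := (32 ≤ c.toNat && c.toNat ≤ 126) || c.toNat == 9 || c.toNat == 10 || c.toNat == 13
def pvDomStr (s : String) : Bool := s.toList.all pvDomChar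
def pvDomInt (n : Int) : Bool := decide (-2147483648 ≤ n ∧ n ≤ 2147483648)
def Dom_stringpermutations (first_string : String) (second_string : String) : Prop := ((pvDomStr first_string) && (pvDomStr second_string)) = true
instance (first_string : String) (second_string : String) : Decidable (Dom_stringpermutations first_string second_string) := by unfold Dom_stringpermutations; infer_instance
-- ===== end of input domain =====

-- B builds the 0/1 membership mask of second_string and tests whether '1'*len(first_string)
-- is a substring (objective: alternative decomposition — substring search instead of A's stateful counter scan).

-- ===== PORT A =====
-- the scan over second_string with the running `count` and early return True
def spLoopA (dict : PySem.Dict Char Int) (n : Nat) : List Char → Nat → Bool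
  | [], _ => false
  | c :: rest, count =>
    if dict.contains c then
      if count + 1 = n then true else spLoopA dict n rest (count + 1)
    else spLoopA dict n rest 0

def stringpermutations (first_string : String) (second_string : String) : Bool :=
  let dictionary := first_string.toList.foldl (fun d c => d.insert c (1 : Int)) PySem.Dict.empty
  spLoopA dictionary first_string.toList.length second_string.toList 0

-- ===== PORT B =====
def stringpermutations_alt (first_string : String) (second_string : String) : Bool :=
  let charset : PySem.Set Char := PySem.Set.ofList first_string.toList
  let n := first_string.toList.length
  let mask := String.ofList (second_string.toList.map
      (fun c => if PySem.Set.contains charset c then '1' else '0'))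
  decide (n ≠ 0) && PySem.Str.isIn (String.ofList (List.replicate n '1')) mask

-- ===== PRECONDITION & SPEC =====
def Spec_stringpermutations (first_string : String) (second_string : String) (out : Bool) : Prop := out = stringpermutations_alt first_string second_string
instance (first_string : String) (second_string : String) (out : Bool) : Decidable (Spec_stringpermutations first_string second_string out) := by unfold Spec_stringpermutations; infer_instance

-- ===== CLAIM (what is proved, stated in full; the proofs are below) =====
def Claim_equal_stringpermutations : Prop := ∀ (first_string : String) (second_string : String), Dom_stringpermutations first_string second_string → Spec_stringpermutations first_string second_string (stringpermutations first_string second_string)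

-- ===== LEMMAS AND PROOFS =====

theorem spContains_foldl (l : List Char) (d : PySem.Dict Char Int) (c : Char) :
    (l.foldl (fun d c => d.insert c (1 : Int)) d).contains c
      = (d.contains c || l.contains c) := by
  induction l generalizing d with
  | nil => simp
  | cons a t ih =>
    simp only [List.foldl_cons, ih, PySem.Dict.contains_insert, List.contains_cons]
    cases h : (c == a) <;> simp [h]

theorem spReplicate_prefix_mono {k j : Nat} (h : j ≤ k) (t : List Char)
    (hp : List.replicate k '1' <+: t) : List.replicate j '1' <+: t := by
  refine List.IsPrefix.trans ⟨List.replicate (k - j) '1', ?_⟩ hp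
  rw [← List.replicate_add]; congr 1; omega

theorem spLoopA_iff (dict : PySem.Dict Char Int) (p : Char → Bool)
    (hd : ∀ c, dict.contains c = p c) (n : Nat) (hn : 1 ≤ n) :
    ∀ (xs : List Char) (count : Nat), count < n →
      (spLoopA dict n xs count = true ↔
        (List.replicate (n - count) '1' <+: xs.map (fun c => if p c then '1' else '0')
          ∨ List.replicate n '1' <:+: xs.map (fun c => if p c then '1' else '0'))) := by
  intro xs
  induction xs with
  | nil =>
    intro count hc
    have h1 : n - count ≠ 0 := by omega
    constructor
    · intro h; simp [spLoopA] at h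
    · rintro (h | h)
      · rw [List.map_nil, List.prefix_nil] at h
        exact absurd h (by simp [List.replicate_eq_nil_iff, h1])
      · rw [List.map_nil, List.infix_nil] at h
        exact absurd h (by simp [List.replicate_eq_nil_iff]; omega)
  | cons c rest ih =>
    intro count hc
    have hmc : (c :: rest).map (fun c => if p c then '1' else '0')
        = (if p c then '1' else '0') :: rest.map (fun c => if p c then '1' else '0') := rfl
    rw [hmc]
    cases hpc : p c with
    | true =>
      have hstep : spLoopA dict n (c :: rest) count
          = if count + 1 = n then true else spLoopA dict n rest (count + 1) := by
        rw [spLoopA, if_pos (by rw [hd c, hpc])]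
      rw [hstep, if_pos rfl]
      by_cases he : count + 1 = n
      · have h1 : n - count = 1 := by omega
        rw [if_pos he, h1, List.replicate_one]
        simp
      · rw [if_neg he, ih (count + 1) (by omega)]
        have h2 : n - count = (n - (count + 1)) + 1 := by omega
        constructor
        · rintro (h | h)
          · exact Or.inl (by rw [h2, List.replicate_succ]; exact List.cons_prefix_cons.mpr ⟨rfl, h⟩)
          · exact Or.inr (h.trans (List.infix_cons (List.infix_refl _)))
        · rintro (h | h)
          · rw [h2, List.replicate_succ, List.cons_prefix_cons] at h
            exact Or.inl h.2
          · rcases (List.infix_cons_iff).mp h with h | h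
            · left
              have hn1 : n = (n - 1) + 1 := by omega
              rw [hn1, List.replicate_succ, List.cons_prefix_cons] at h
              exact spReplicate_prefix_mono (by omega) _ h.2
            · exact Or.inr h
    | false =>
      have hstep : spLoopA dict n (c :: rest) count = spLoopA dict n rest 0 := by
        rw [spLoopA, if_neg (by rw [hd c, hpc]; simp)]
      rw [hstep, if_neg (by simp), ih 0 (by omega)]
      have hne : ∀ k, 1 ≤ k → ¬ (List.replicate k '1' <+: ('0' :: (rest.map (fun c => if p c then '1' else '0')))) := by
        intro k hk h
        have hk1 : k = (k - 1) + 1 := by omega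
        rw [hk1, List.replicate_succ, List.cons_prefix_cons] at h
        exact absurd h.1 (by decide)
      constructor
      · rintro (h | h)
        · rw [Nat.sub_zero] at h
          exact Or.inr (List.infix_cons h.isInfix)
        · exact Or.inr (List.infix_cons h)
      · rintro (h | h)
        · exact absurd h (hne (n - count) (by omega))
        · rcases (List.infix_cons_iff).mp h with h | h
          · exact absurd h (hne n hn)
          · exact Or.inr h

theorem spLoopA_zero (dict : PySem.Dict Char Int) (hd : ∀ c, dict.contains c = false) :
    ∀ (xs : List Char) (count : Nat), spLoopA dict 0 xs count = false := by
  intro xs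
  induction xs with
  | nil => intro count; rfl
  | cons c rest ih =>
    intro count
    rw [spLoopA, if_neg (by rw [hd c]; simp)]
    exact ih 0

theorem stringpermutations_eq (f s : String) :
    stringpermutations f s = stringpermutations_alt f s := by
  unfold stringpermutations stringpermutations_alt
  simp only
  set p : Char → Bool := fun c => f.toList.contains c with hp
  have hd : ∀ c, (f.toList.foldl (fun d c => d.insert c (1 : Int)) PySem.Dict.empty).contains c = p c := by
    intro c; rw [spContains_foldl]; simp [hp]
  have hset : ∀ c, PySem.Set.contains (PySem.Set.ofList f.toList) c = p c := by
    intro c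
    simp only [PySem.Set.contains_eq_listContains, hp]
    cases h : f.toList.contains c
    · simp only [List.contains_eq_mem, decide_eq_false_iff_not] at h ⊢
      rw [PySem.Set.mem_ofList]; exact h
    · simp only [List.contains_eq_mem, decide_eq_true_eq] at h ⊢
      rw [PySem.Set.mem_ofList]; exact h
  have hmaskeq : (s.toList.map (fun c => if PySem.Set.contains (PySem.Set.ofList f.toList) c then '1' else '0'))
      = s.toList.map (fun c => if p c then '1' else '0') := by
    apply List.map_congr_left; intro c _; rw [hset]
  by_cases hn : f.toList.length = 0
  · have hfl : f.toList = [] := List.length_eq_zero_iff.mp hn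
    have hde : ∀ c, (f.toList.foldl (fun d c => d.insert c (1 : Int)) PySem.Dict.empty).contains c = false := by
      intro c; rw [hd c, hp]; rw [hfl]; rfl
    rw [hn, spLoopA_zero _ hde]
    simp
  · have hn1 : 1 ≤ f.toList.length := by omega
    rw [Bool.eq_iff_iff]
    rw [spLoopA_iff _ p hd _ hn1 s.toList 0 (by omega)]
    rw [hmaskeq]
    rw [Bool.and_eq_true, decide_eq_true_eq, PySem.Str.isIn_iff_infix]
    simp only [String.toList_ofList, Nat.sub_zero]
    constructor
    · rintro (h | h)
      · exact ⟨hn, h.isInfix⟩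
      · exact ⟨hn, h⟩
    · rintro ⟨_, h⟩; exact Or.inr h

-- ===== VERDICT (by name: the statement is the Claim_ definition above) =====
theorem stringpermutations_spec : Claim_equal_stringpermutations := by
  intro f s _
  unfold Spec_stringpermutations
  exact stringpermutations_eq f s
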